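-- pv_equiv track=rewrite | github.com/DavidCPorter/sapa | utils/bin/interactive_exp.py | update_groupnames
-- ===== SOURCE A (Python) =====
-- from typing import Set
-- from itertools import permutations
--
-- def update_groupnames(branch_names: Set):
--     groupnames_list = []
--     valid_groupnames_dict = {}
--     for r in range(1, len(branch_names)+1):
--         itertools = permutations(branch_names, r)
--         for i in itertools:
--             groupnames_list.append(','.join(i))
--             valid_groupnames_dict.update({','.join(i) : set(i)})
--
--
--     for i in groupnames_list:
--         set_to_remove = set(i.split(','))
--         value_set = branch_names - set_to_remove
--         valid_groupnames_dict.update({'all!'+i : value_set})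
--
--     valid_groupnames_dict.update({'all' : branch_names})
--
--     return valid_groupnames_dict
-- ===== SOURCE B (Python) =====
-- from typing import Set
--
--
-- def update_groupnames(branch_names: Set):
--     # Lehmer-code unranking: instead of generating permutations by recursive /
--     # iterative extension, each r-permutation is decoded arithmetically from its
--     # rank m in range(n*(n-1)*...*(n-r+1)) via a divmod chain; the 'all!'
--     # entries are then derived from the dict's own keys (no saved worklist).
--     names = list(branch_names)
--     n = len(names)
--     d = {}
--     for r in range(1, n + 1):
--         total = 1
--         for t in range(n - r + 1, n + 1):
--             total *= t
--         for m in range(total):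
--             digits = []
--             q = m
--             for radix in range(n - r + 1, n + 1):
--                 q, rem = divmod(q, radix)
--                 digits.append(rem)
--             digits.reverse()
--             pool = names[:]
--             perm = [pool.pop(dig) for dig in digits]
--             d[','.join(perm)] = set(perm)
--     for k in list(d):
--         d['all!' + k] = branch_names - set(k.split(','))
--     d['all'] = branch_names
--     return d
-- ===== Notes on version B (the rewrite author's own statement) =====
-- stated objective: alternative
-- what changed: B drops itertools.permutations entirely: each r-permutation is decoded arithmetically from its rank by Lehmer-code unranking (a divmod chain over the radices n-r+1..n followed by indexed pops from a fresh pool), and the 'all!' entries are derived from the dict's own keys instead of a second scan over a saved worklist.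
import Mathlib
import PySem

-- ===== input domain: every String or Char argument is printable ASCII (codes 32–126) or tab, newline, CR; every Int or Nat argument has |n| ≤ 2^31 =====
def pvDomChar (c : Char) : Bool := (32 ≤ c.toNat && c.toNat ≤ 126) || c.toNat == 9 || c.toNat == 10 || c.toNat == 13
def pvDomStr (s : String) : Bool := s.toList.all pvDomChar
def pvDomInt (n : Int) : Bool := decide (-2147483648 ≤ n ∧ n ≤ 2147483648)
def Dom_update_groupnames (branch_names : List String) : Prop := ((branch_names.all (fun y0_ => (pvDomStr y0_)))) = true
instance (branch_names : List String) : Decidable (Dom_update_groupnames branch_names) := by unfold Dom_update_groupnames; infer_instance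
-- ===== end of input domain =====

-- B replaces itertools.permutations by Lehmer-code unranking (each permutation decoded
-- arithmetically from its rank via a divmod chain) and derives the 'all!' entries from the
-- dict's own keys instead of a saved worklist (alternative algorithm, similar cost).


-- ===== PORT A =====
-- branch_names models the Python set argument (its distinct elements, in one fixed order).
-- i.split(',') never raises (sep ≠ ""), so PySem.Str.split? is always `some`; `.getD []` is exact.
def update_groupnames (branch_names : List String) : List (String × List String) :=
  let s1 : List String × PySem.Dict String (List String) :=
    (PySem.List.pyRange 1 (PySem.Set.len branch_names + 1)).foldl
      (fun s r =>
        (PySem.List.permutations branch_names r.toNat).foldl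
          (fun s i =>
            (s.1 ++ [PySem.Str.join "," i], s.2.insert (PySem.Str.join "," i) (PySem.Set.ofList i)))
          s)
      ([], PySem.Dict.empty)
  let d2 := s1.1.foldl
    (fun d i =>
      d.insert ("all!" ++ i)
        (PySem.Set.diff branch_names (PySem.Set.ofList ((PySem.Str.split? i ",").getD []))))
    s1.2
  (d2.insert "all" branch_names).items

-- ===== PORT B =====
-- one divmod step of B's digit chain: q, rem = divmod(q, radix) with the remainder appended
-- (radix ≥ 1 at every call site, so divmod = (floordiv, mod) is exact)
def pvStepDigits (s : List Int × Int) (radix : Int) : List Int × Int :=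
  (s.1 ++ [PySem.Int.mod s.2 radix], PySem.Int.floordiv s.2 radix)
-- one pop step of B's `[pool.pop(dig) for dig in digits]` (the none branch is unreachable:
-- every decoded digit is in range)
def pvStepPop (s : List String × List String) (dig : Int) : List String × List String :=
  ((PySem.List.pop? s.2 dig).elim s (fun p => (s.1 ++ [p.1], p.2)))

def update_groupnames_alt (branch_names : List String) : List (String × List String) :=
  let d1 : PySem.Dict String (List String) :=
    (PySem.List.pyRange 1 ((branch_names.length : Int) + 1)).foldl
      (fun d r =>
        (PySem.List.pyRange 0
            ((PySem.List.pyRange ((branch_names.length : Int) - r + 1)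
                ((branch_names.length : Int) + 1)).foldl (fun acc t => acc * t) 1)).foldl
          (fun d m =>
            let digits := ((PySem.List.pyRange ((branch_names.length : Int) - r + 1)
                ((branch_names.length : Int) + 1)).foldl pvStepDigits ([], m)).1.reverse
            let pr := digits.foldl pvStepPop ([], branch_names)
            d.insert (PySem.Str.join "," pr.1) (PySem.Set.ofList pr.1))
          d)
      PySem.Dict.empty
  let d2 := d1.keys.foldl
    (fun d k =>
      d.insert ("all!" ++ k)
        (PySem.Set.diff branch_names (PySem.Set.ofList ((PySem.Str.split? k ",").getD []))))
    d1
  (d2.insert "all" branch_names).items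

-- ===== PRECONDITION & SPEC =====
def Spec_update_groupnames (branch_names : List String) (out : List (String × List String)) : Prop := out = update_groupnames_alt branch_names
instance (branch_names : List String) (out : List (String × List String)) : Decidable (Spec_update_groupnames branch_names out) := by unfold Spec_update_groupnames; infer_instance

-- ===== CLAIM (what is proved, stated in full; the proofs are below) =====
def Claim_equal_update_groupnames : Prop := ∀ (branch_names : List String), Dom_update_groupnames branch_names → Spec_update_groupnames branch_names (update_groupnames branch_names)

-- ===== LEMMAS AND PROOFS =====

-- Nat-level shadows of B's inner loop
def pvLSD : List Nat → Nat → List Nat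
  | [], _ => []
  | radix :: rs, m => (m % radix) :: pvLSD rs (m / radix)

def pvQuot : List Nat → Nat → Nat
  | [], m => m
  | radix :: rs, m => pvQuot rs (m / radix)

def pvProd (l : List Nat) : Nat := l.prod

def pvPopN : List String → List Nat → List String × List String
  | pool, [] => ([], pool)
  | pool, d :: ds =>
    match pool[d]? with
    | some x =>
      let t := pvPopN (pool.eraseIdx d) ds
      (x :: t.1, t.2)
    | none => pvPopN pool ds

def pvRads (n r : Nat) : List Nat := List.range' (n - r + 1) r

theorem pvChainInt (rads : List Nat) : ∀ (acc : List Int) (m : Nat),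
    rads.foldl (fun s (radix : Nat) => pvStepDigits s (radix : Int)) (acc, (m : Int))
    = (acc ++ (pvLSD rads m).map (fun x : Nat => (x : Int)), ((pvQuot rads m : Nat) : Int)) := by
  induction rads with
  | nil => intro acc m; simp [pvLSD, pvQuot]
  | cons radix rs ih =>
    intro acc m
    rw [List.foldl_cons,
      show pvStepDigits (acc, (m : Int)) (radix : Int)
          = (acc ++ [((m % radix : Nat) : Int)], ((m / radix : Nat) : Int)) from by
        simp [pvStepDigits, PySem.Int.mod_natCast, PySem.Int.floordiv_natCast],
      ih]
    simp [pvLSD, pvQuot]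

theorem pvPopInt (ds : List Nat) : ∀ (acc pool : List String),
    ds.foldl (fun s (dig : Nat) => pvStepPop s (dig : Int)) (acc, pool)
    = (acc ++ (pvPopN pool ds).1, (pvPopN pool ds).2) := by
  induction ds with
  | nil => intro acc pool; simp [pvPopN]
  | cons d ds ih =>
    intro acc pool
    simp only [List.foldl_cons]
    by_cases h : d < pool.length
    · rw [show pvStepPop (acc, pool) (d : Int) = (acc ++ [pool[d]], pool.eraseIdx d) from by
        simp [pvStepPop, PySem.List.pop?_natCast pool d h]]
      rw [ih]
      simp [pvPopN, List.getElem?_eq_getElem h]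
    · have hn : PySem.List.pop? pool (d : Int) = none := by
        simp [PySem.List.pop?, PySem.List.pyIdx?]
        omega
      rw [show pvStepPop (acc, pool) (d : Int) = (acc, pool) from by simp [pvStepPop, hn]]
      rw [ih]
      have hg : pool[d]? = none := by
        rw [List.getElem?_eq_none_iff]
        omega
      simp [pvPopN, hg]

theorem pvLSD_append (rs : List Nat) (t : Nat) : ∀ m,
    pvLSD (rs ++ [t]) m = pvLSD rs m ++ [pvQuot rs m % t] := by
  induction rs with
  | nil => intro m; simp [pvLSD, pvQuot]
  | cons r rs ih => intro m; simp [pvLSD, pvQuot, ih]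

theorem pvSplit (rs : List Nat) : ∀ (i j : Nat), (∀ x ∈ rs, 0 < x) → j < pvProd rs →
    pvLSD rs (i * pvProd rs + j) = pvLSD rs j ∧ pvQuot rs (i * pvProd rs + j) = i := by
  induction rs with
  | nil =>
    intro i j _ hj
    unfold pvProd at hj
    simp at hj
    subst hj
    simp [pvLSD, pvQuot, pvProd]
  | cons r rs ih =>
    intro i j hpos hj
    have hr : 0 < r := hpos r (List.mem_cons_self ..)
    have hP : pvProd (r :: rs) = r * pvProd rs := by simp [pvProd]
    have hm : i * pvProd (r :: rs) + j = r * (i * pvProd rs) + j := by rw [hP]; ring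
    have hmod : (i * pvProd (r :: rs) + j) % r = j % r := by
      rw [hm, Nat.mul_add_mod]
    have hdiv : (i * pvProd (r :: rs) + j) / r = i * pvProd rs + j / r := by
      rw [hm, Nat.mul_add_div hr]
    have hj' : j / r < pvProd rs := by
      rw [Nat.div_lt_iff_lt_mul hr, Nat.mul_comm]
      rw [hP] at hj
      exact hj
    have hpos' : ∀ x ∈ rs, 0 < x := fun x hx => hpos x (List.mem_cons_of_mem _ hx)
    obtain ⟨e1, e2⟩ := ih i (j / r) hpos' hj'
    refine ⟨?_, ?_⟩
    · show (i * pvProd (r :: rs) + j) % r :: pvLSD rs ((i * pvProd (r :: rs) + j) / r)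
        = j % r :: pvLSD rs (j / r)
      rw [hmod, hdiv, e1]
    · show pvQuot rs ((i * pvProd (r :: rs) + j) / r) = i
      rw [hdiv, e2]

theorem pvRange_mul (a b : Nat) :
    List.range (b * a) = (List.range a).flatMap (fun i => (List.range b).map (fun j => i * b + j)) := by
  induction a with
  | zero => simp
  | succ a ih =>
    rw [show b * (a + 1) = b * a + b from by ring, List.range_add, ih, List.range_succ,
      List.flatMap_append]
    simp [Nat.mul_comm]

-- unranking is correct: decoding every rank in order yields itertools.permutations' list
theorem pvUnrank : ∀ (r : Nat) (xs : List String), r ≤ xs.length →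
    (List.range (pvProd (pvRads xs.length r))).map
      (fun m => (pvPopN xs ((pvLSD (pvRads xs.length r) m).reverse)).1)
    = PySem.List.permutations xs r := by
  intro r
  induction r with
  | zero =>
    intro xs _
    have h0 : PySem.List.permutations xs 0 = [[]] := rfl
    rw [h0]
    simp [pvRads, pvProd, pvLSD, pvPopN, List.range_one]
  | succ r ih =>
    intro xs hr
    have h1 : pvRads xs.length (r + 1) = pvRads (xs.length - 1) r ++ [xs.length] := by
      unfold pvRads
      rw [show xs.length - (r + 1) + 1 = xs.length - r from by omega,
        show xs.length - 1 - r + 1 = xs.length - r from by omega,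
        List.range'_concat,
        show xs.length - r + 1 * r = xs.length from by omega]
    have hpos : ∀ x ∈ pvRads (xs.length - 1) r, 0 < x := by
      intro x hx
      unfold pvRads at hx
      rw [List.mem_range'] at hx
      omega
    have hprod : pvProd (pvRads xs.length (r + 1))
        = pvProd (pvRads (xs.length - 1) r) * xs.length := by
      rw [h1]; simp [pvProd]
    rw [PySem.List.permutations, hprod, pvRange_mul xs.length (pvProd (pvRads (xs.length - 1) r)),
      List.map_flatMap]
    rw [List.flatMap_def, List.flatMap_def]
    apply congrArg
    apply List.map_congr_left
    intro i hi
    rw [List.mem_range] at hi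
    simp only [List.getElem?_eq_getElem hi]
    rw [List.map_map]
    have hlen : (xs.eraseIdx i).length = xs.length - 1 := by
      rw [List.length_eraseIdx]
      simp [hi]
    have hIH := ih (xs.eraseIdx i) (by omega)
    rw [hlen] at hIH
    rw [← hIH, List.map_map]
    apply List.map_congr_left
    intro j hj
    rw [List.mem_range] at hj
    show (pvPopN xs ((pvLSD (pvRads xs.length (r + 1))
        (i * pvProd (pvRads (xs.length - 1) r) + j)).reverse)).1
      = xs[i] :: (pvPopN (xs.eraseIdx i) ((pvLSD (pvRads (xs.length - 1) r) j).reverse)).1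
    rw [h1, pvLSD_append,
      (pvSplit (pvRads (xs.length - 1) r) i j hpos hj).1,
      (pvSplit (pvRads (xs.length - 1) r) i j hpos hj).2,
      Nat.mod_eq_of_lt hi]
    simp only [List.reverse_append, List.reverse_cons, List.reverse_nil, List.nil_append,
      List.singleton_append]
    simp [pvPopN, List.getElem?_eq_getElem hi]

theorem pvRangeCastNat (a b : Nat) (h : a ≤ b) :
    PySem.List.pyRange (a : Int) (b : Int)
    = (List.range' a (b - a)).map (fun x : Nat => (x : Int)) := by
  rw [PySem.List.pyRange_one, List.range'_eq_map_range, List.map_map]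
  rw [show ((b : Int) - (a : Int)).toNat = b - a from by omega]
  apply List.map_congr_left
  intro k _
  simp

theorem pvProdInt (l : List Nat) : ∀ (init : Nat),
    (l.map (fun x : Nat => (x : Int))).foldl (fun acc t => acc * t) ((init : Nat) : Int)
    = ((l.foldl (· * ·) init : Nat) : Int) := by
  induction l with
  | nil => intro init; simp
  | cons x xs ih =>
    intro init
    simp only [List.map_cons, List.foldl_cons]
    rw [show ((init : Nat) : Int) * (x : Int) = (((init * x : Nat) : Nat) : Int) from by push_cast; ring]
    rw [ih]

def pvQ (xs : List String) (k : Nat) : List (List String) :=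
  (List.range k).flatMap (fun j => PySem.List.permutations xs (j + 1))

theorem pvRange_cast (n : Nat) :
    PySem.List.pyRange 1 ((n : Int) + 1) = (List.range n).map (fun (j : Nat) => ((j : Int) + 1)) := by
  induction n with
  | zero => decide
  | succ n ih =>
    have h1 : ((n : Int) + 1 + 1) = (((n + 1 : Nat) : Int) + 1) := by push_cast; ring
    rw [List.range_succ, List.map_append, ← ih, ← h1,
      PySem.List.pyRange_one_succ_right (by omega)]
    simp

-- B's inner loop at rank r = j+1 inserts exactly the r-permutations, in order
theorem pvInner (xs : List String) (j : Nat) (hj : j < xs.length)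
    (d : PySem.Dict String (List String)) :
    (PySem.List.pyRange 0
        ((PySem.List.pyRange ((xs.length : Int) - ((j : Int) + 1) + 1) ((xs.length : Int) + 1)).foldl
          (fun acc t => acc * t) 1)).foldl
      (fun d m =>
        let digits := ((PySem.List.pyRange ((xs.length : Int) - ((j : Int) + 1) + 1)
            ((xs.length : Int) + 1)).foldl pvStepDigits ([], m)).1.reverse
        let pr := digits.foldl pvStepPop ([], xs)
        d.insert (PySem.Str.join "," pr.1) (PySem.Set.ofList pr.1))
      d
    = (PySem.List.permutations xs (j + 1)).foldl
        (fun d i => d.insert (PySem.Str.join "," i) (PySem.Set.ofList i)) d := by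
  have hrad : PySem.List.pyRange ((xs.length : Int) - ((j : Int) + 1) + 1) ((xs.length : Int) + 1)
      = (pvRads xs.length (j + 1)).map (fun x : Nat => (x : Int)) := by
    rw [show ((xs.length : Int) - ((j : Int) + 1) + 1) = ((xs.length - j : Nat) : Int) from by omega,
      show ((xs.length : Int) + 1) = ((xs.length + 1 : Nat) : Int) from by push_cast; ring,
      pvRangeCastNat (xs.length - j) (xs.length + 1) (by omega)]
    unfold pvRads
    rw [show xs.length + 1 - (xs.length - j) = j + 1 from by omega,
      show xs.length - (j + 1) + 1 = xs.length - j from by omega]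
  have htot : ((pvRads xs.length (j + 1)).map (fun x : Nat => (x : Int))).foldl
      (fun acc t => acc * t) 1 = ((pvProd (pvRads xs.length (j + 1)) : Nat) : Int) := by
    rw [← Nat.cast_one (R := Int), pvProdInt]
    unfold pvProd
    rw [List.prod_eq_foldl]
  simp only [hrad, htot, PySem.List.pyRange_zero_natCast, List.foldl_map, pvChainInt,
    List.nil_append, ← List.map_reverse, pvPopInt]
  rw [← pvUnrank (j + 1) xs (by omega), List.foldl_map]

-- B's whole first stage equals one fold over the concatenated permutation lists
theorem pvBside (xs : List String) :
    (PySem.List.pyRange 1 ((xs.length : Int) + 1)).foldl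
      (fun d r =>
        (PySem.List.pyRange 0
            ((PySem.List.pyRange ((xs.length : Int) - r + 1) ((xs.length : Int) + 1)).foldl
              (fun acc t => acc * t) 1)).foldl
          (fun d m =>
            let digits := ((PySem.List.pyRange ((xs.length : Int) - r + 1)
                ((xs.length : Int) + 1)).foldl pvStepDigits ([], m)).1.reverse
            let pr := digits.foldl pvStepPop ([], xs)
            d.insert (PySem.Str.join "," pr.1) (PySem.Set.ofList pr.1))
          d)
      PySem.Dict.empty
    = (pvQ xs xs.length).foldl
        (fun d i => d.insert (PySem.Str.join "," i) (PySem.Set.ofList i)) PySem.Dict.empty := by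
  rw [pvRange_cast xs.length, List.foldl_map,
    show pvQ xs xs.length
        = (List.range xs.length).flatMap (fun j => PySem.List.permutations xs (j + 1)) from rfl,
    List.foldl_flatMap]
  apply PySem.List.foldl_congr_mem
  intro d j hj
  rw [List.mem_range] at hj
  exact pvInner xs j hj d

theorem pvFoldl_pair {β σ1 σ2 : Type} (f : σ1 → β → σ1) (g : σ2 → β → σ2) (l : List β)
    (s : σ1 × σ2) :
    l.foldl (fun s e => (f s.1 e, g s.2 e)) s = (l.foldl f s.1, l.foldl g s.2) := by
  cases s; exact PySem.List.foldl_prod_mk f g l _ _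

theorem pvItems_inj {κ ν : Type} [BEq κ] [LawfulBEq κ] (d : PySem.Dict κ ν)
    (hnd : d.keys.Nodup) {p q : κ × ν} (hp : p ∈ d.items) (hq : q ∈ d.items)
    (he : p.1 = q.1) : p = q := by
  have : (d.items.map Prod.fst).Nodup := hnd
  exact List.inj_on_of_nodup_map this hp hq he

theorem pvInsert_eq_self {κ ν : Type} [BEq κ] [LawfulBEq κ] (d : PySem.Dict κ ν) (k : κ) (v : ν)
    (hnd : d.keys.Nodup) (h : d.get? k = some v) : d.insert k v = d := by
  have hm : (k, v) ∈ d.items := PySem.Dict.mem_items_of_get?_eq_some d h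
  have hc : d.contains k = true := by
    rw [PySem.Dict.contains_eq_isSome_get?, h]; rfl
  apply PySem.Dict.ext
  rw [PySem.Dict.items_insert_of_contains d v hc]
  have : ∀ p ∈ d.items, (if p.1 == k then (k, v) else p) = p := by
    intro p hp
    by_cases hk : p.1 = k
    · rw [if_pos (by simp [hk])]
      exact (pvItems_inj d hnd hp hm (by simp [hk])).symm ▸ rfl
    · rw [if_neg (by simp [hk])]
  rw [List.map_congr_left this, List.map_id']

theorem pvUpdate_prefix {α : Type} [BEq α] [LawfulBEq α] :
    ∀ (l : List α) (s : PySem.Set α), s <+: PySem.Set.update s l := by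
  intro l
  induction l with
  | nil => intro s; exact List.prefix_rfl
  | cons x t ih =>
    intro s
    have h1 : s <+: PySem.Set.add s x := by
      unfold PySem.Set.add
      split
      · exact List.prefix_rfl
      · exact ⟨[x], rfl⟩
    exact h1.trans (ih (PySem.Set.add s x))

theorem pvFold_dedup {β κ ν : Type} [BEq β] [LawfulBEq β] [BEq κ] [LawfulBEq κ]
    (g : β → κ) (f : β → ν) (hg : ∀ a b, g a = g b → a = b) :
    ∀ (l : List β) (s : PySem.Set β) (d : PySem.Dict κ ν), d.keys.Nodup →
      (∀ x ∈ s, d.get? (g x) = some (f x)) →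
      l.foldl (fun d x => d.insert (g x) (f x)) d
        = ((PySem.Set.update s l).drop s.length).foldl (fun d x => d.insert (g x) (f x)) d := by
  intro l
  induction l with
  | nil =>
    intro s d _ _
    show d = (s.drop s.length).foldl _ d
    rw [List.drop_length]
    rfl
  | cons x t ih =>
    intro s d hnd hs
    show (t.foldl _ (d.insert (g x) (f x))) = ((PySem.Set.update s (x :: t)).drop s.length).foldl _ d
    have hupd : PySem.Set.update s (x :: t) = PySem.Set.update (PySem.Set.add s x) t := rfl
    by_cases hx : s.contains x = true
    · have hmem : x ∈ s := by simpa using hx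
      have hins : d.insert (g x) (f x) = d := pvInsert_eq_self d _ _ hnd (hs x hmem)
      have hadd : PySem.Set.add s x = s := by unfold PySem.Set.add; rw [if_pos hx]
      rw [hins, hupd, hadd]
      exact ih s d hnd hs
    · have hadd : PySem.Set.add s x = s ++ [x] := by unfold PySem.Set.add; rw [if_neg hx]
      obtain ⟨u, hu⟩ := pvUpdate_prefix t (s ++ [x])
      have hnd' : (d.insert (g x) (f x)).keys.Nodup := PySem.Dict.nodup_keys_insert d (g x) (f x) hnd
      have hs' : ∀ y ∈ s ++ [x], (d.insert (g x) (f x)).get? (g y) = some (f y) := by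
        intro y hy
        rcases List.mem_append.mp hy with hy | hy
        · have hne : y ≠ x := fun he => by
            rw [he] at hy
            exact hx (by simpa using hy)
          rw [PySem.Dict.get?_insert_of_ne d (f x) (fun hgy => hne (hg y x hgy))]
          exact hs y hy
        · rw [List.mem_singleton.mp hy]
          exact PySem.Dict.get?_insert_self ..
      have := ih (s ++ [x]) (d.insert (g x) (f x)) hnd' hs'
      have hd1 : (((s ++ [x]) ++ u).drop ((s ++ [x]).length)) = u := List.drop_left ..
      have hd2 : (((s ++ [x]) ++ u).drop s.length) = x :: u := by
        rw [List.append_assoc, List.drop_left]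
        rfl
      rw [hupd, hadd, this, ← hu, hd1, hd2]
      rfl

theorem pvAllBang_inj (a b : String) (h : "all!" ++ a = "all!" ++ b) : a = b := by
  have := congrArg String.toList h
  rw [String.toList_append, String.toList_append] at this
  have h2 := List.append_cancel_left this
  have := congrArg String.ofList h2
  simpa [String.ofList_toList] using this

theorem pvMain (xs : List String) :
    update_groupnames xs = update_groupnames_alt xs := by
  unfold update_groupnames update_groupnames_alt
  rw [pvBside xs]
  simp only [pvFoldl_pair (fun acc (i : List String) => acc ++ [PySem.Str.join "," i])
    (fun (d : PySem.Dict String (List String)) i =>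
      d.insert (PySem.Str.join "," i) (PySem.Set.ofList i))]
  simp only [pvFoldl_pair
    (fun (gl : List String) (r : Int) =>
      (PySem.List.permutations xs r.toNat).foldl
        (fun acc i => acc ++ [PySem.Str.join "," i]) gl)
    (fun (d : PySem.Dict String (List String)) (r : Int) =>
      (PySem.List.permutations xs r.toNat).foldl
        (fun d i => d.insert (PySem.Str.join "," i) (PySem.Set.ofList i)) d)]
  have hlen : PySem.Set.len xs = ((xs.length : Nat) : Int) := rfl
  simp only [hlen, pvRange_cast, List.foldl_map]
  have ht : ∀ j : Nat, ((j : Int) + 1).toNat = j + 1 := fun j => by omega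
  simp only [ht]
  simp only [PySem.List.foldl_append_singleton_eq_map, PySem.List.foldl_append_eq_flatMap]
  rw [← List.foldl_flatMap]
  have hq : (List.range xs.length).flatMap (fun j => PySem.List.permutations xs (j + 1))
      = pvQ xs xs.length := rfl
  rw [hq]
  have hgl : ([] : List String) ++ (List.range xs.length).flatMap
        (fun j => (PySem.List.permutations xs (j + 1)).map (fun i => PySem.Str.join "," i))
      = (pvQ xs xs.length).map (fun i => PySem.Str.join "," i) := by
    rw [List.nil_append, ← List.map_flatMap, hq]
  rw [hgl]
  rw [PySem.Dict.keys_foldl_insert_key (pvQ xs xs.length)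
    (fun i => PySem.Str.join "," i) (fun _ i => PySem.Set.ofList i)]
  have hkeys : (PySem.Dict.empty : PySem.Dict String (List String)).keys = [] := rfl
  rw [hkeys]
  have hnd1 : ((pvQ xs xs.length).foldl
      (fun d i => d.insert (PySem.Str.join "," i) (PySem.Set.ofList i))
      PySem.Dict.empty).keys.Nodup :=
    PySem.Dict.nodup_keys_foldl_insert_key (pvQ xs xs.length)
      (fun i => PySem.Str.join "," i) (fun _ i => PySem.Set.ofList i)
      PySem.Dict.empty PySem.Dict.nodup_keys_empty
  have hfd := pvFold_dedup (fun k => "all!" ++ k)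
      (fun k => PySem.Set.diff xs (PySem.Set.ofList ((PySem.Str.split? k ",").getD [])))
      (fun a b h => pvAllBang_inj a b h)
      ((pvQ xs xs.length).map (fun i => PySem.Str.join "," i)) [] _ hnd1
      (by intro x hx; simp at hx)
  simp only [List.length_nil, List.drop_zero] at hfd
  rw [hfd]

-- ===== VERDICT (by name: the statement is the Claim_ definition above) =====
theorem update_groupnames_spec : Claim_equal_update_groupnames := by
  intro xs _
  show update_groupnames xs = update_groupnames_alt xs
  exact pvMain xs
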